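-- pv_equiv track=rewrite | github.com/e2nIEE/pandapower | pandapower/grid_equivalents/toolbox.py | dict_sum_value
-- ===== SOURCE A (Python) =====
-- from copy import deepcopy
--
-- def dict_sum_value(dict1, dict2):
--     """
--     Return a dict with the sum of values of both input dicts.
--     """
--     output = deepcopy(dict1)
--     dict2 = deepcopy(dict2)
--     for key in set(dict2.keys()) & set(output.keys()):
--         output[key] += dict2[key]
--         del dict2[key]  # to not overwrite the new output values by dict2 in the line
--         # "output.update(dict2)"
--     output.update(dict2)  # include all values of dict2 which keys are not in dict1
--     return output
-- ===== SOURCE B (Python) =====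
-- def dict_sum_value(dict1, dict2):
--     """
--     Return a dict with the sum of values of both input dicts.
--     """
--     return {key: dict1.get(key, 0) + dict2.get(key, 0)
--             for key in {**dict1, **dict2}}
-- ===== Notes on version B (the rewrite author's own statement) =====
-- stated objective: simpler
-- what changed: Replaces A's imperative merge (deepcopies, set-intersection of key sets, in-place += loop with deletions, then bulk dict.update) by a purely functional construction: the merged key order is {**dict1, **dict2} and the result is one comprehension summing dict1.get(k,0)+dict2.get(k,0), with no mutation or membership branch.
import Mathlib
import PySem

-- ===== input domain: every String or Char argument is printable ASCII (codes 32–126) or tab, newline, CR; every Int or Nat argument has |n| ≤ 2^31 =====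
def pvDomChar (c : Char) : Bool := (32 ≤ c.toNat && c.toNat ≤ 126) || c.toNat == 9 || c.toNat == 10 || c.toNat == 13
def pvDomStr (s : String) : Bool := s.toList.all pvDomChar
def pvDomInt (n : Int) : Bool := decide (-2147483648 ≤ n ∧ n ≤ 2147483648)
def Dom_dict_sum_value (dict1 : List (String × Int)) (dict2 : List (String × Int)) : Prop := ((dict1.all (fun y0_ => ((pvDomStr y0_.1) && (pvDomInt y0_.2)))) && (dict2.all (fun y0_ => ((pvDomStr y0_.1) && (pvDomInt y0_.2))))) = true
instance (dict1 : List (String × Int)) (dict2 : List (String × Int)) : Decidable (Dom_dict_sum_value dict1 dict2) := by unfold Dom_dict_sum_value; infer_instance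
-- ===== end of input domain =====

-- ===== PORT A =====
-- B replaces A's imperative merge (intersection loop + dict.update) by a purely functional
-- comprehension over the merged key order {**dict1, **dict2} with get(k,0)+get(k,0) sums
-- (objective: simpler; return-value equivalence only — A deepcopies, irrelevant for int values).
def dict_sum_value (dict1 : List (String × Int)) (dict2 : List (String × Int)) : List (String × Int) :=
  -- output = deepcopy(dict1); dict2 = deepcopy(dict2)
  let output := PySem.Dict.ofList dict1
  let d2 := PySem.Dict.ofList dict2
  -- for key in set(dict2.keys()) & set(output.keys()): output[key] += dict2[key]; del dict2[key]
  -- (the set's hash iteration order does not affect the result: the keys are distinct,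
  --  each step touches only its own key, and no step reorders the dicts)
  let inter := PySem.Set.inter (PySem.Set.ofList (PySem.Dict.keys d2)) (PySem.Set.ofList (PySem.Dict.keys output))
  let st := inter.foldl
    (fun (st : PySem.Dict String Int × PySem.Dict String Int) k =>
      (st.1.modify k 0 (fun w => w + st.2.getD k 0), st.2.erase k))
    (output, d2)
  -- output.update(dict2); return output
  (PySem.Dict.update st.1 st.2.items).items

-- ===== PORT B =====
def dict_sum_value_alt (dict1 : List (String × Int)) (dict2 : List (String × Int)) : List (String × Int) :=
  -- return {key: dict1.get(key, 0) + dict2.get(key, 0) for key in {**dict1, **dict2}}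
  let a := PySem.Dict.ofList dict1
  let b := PySem.Dict.ofList dict2
  (PySem.Dict.update a b.items).keys.map (fun k => (k, a.getD k 0 + b.getD k 0))

-- ===== PRECONDITION & SPEC =====
def Spec_dict_sum_value (dict1 : List (String × Int)) (dict2 : List (String × Int)) (out : List (String × Int)) : Prop := out = dict_sum_value_alt dict1 dict2
instance (dict1 : List (String × Int)) (dict2 : List (String × Int)) (out : List (String × Int)) : Decidable (Spec_dict_sum_value dict1 dict2 out) := by unfold Spec_dict_sum_value; infer_instance

-- ===== CLAIM (what is proved, stated in full; the proofs are below) =====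
def Claim_equal_dict_sum_value : Prop := ∀ (dict1 : List (String × Int)) (dict2 : List (String × Int)), Dom_dict_sum_value dict1 dict2 → Spec_dict_sum_value dict1 dict2 (dict_sum_value dict1 dict2)

-- ===== LEMMAS AND PROOFS =====

-- the single-pass merge both ports are reduced to
def mergeStep (o : PySem.Dict String Int) (p : String × Int) : PySem.Dict String Int :=
  if o.contains p.1 then o.modify p.1 0 (fun w => w + p.2) else o.insert p.1 p.2

theorem get?_erase_of_ne (d : PySem.Dict String Int) (k k' : String) (h : k' ≠ k) :
    (d.erase k).get? k' = d.get? k' := by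
  obtain ⟨l⟩ := d
  simp only [PySem.Dict.erase, PySem.Dict.get?, List.find?_filter]
  have : (fun a : String × Int => decide ((!a.1 == k) = true ∧ (a.1 == k') = true))
       = fun a : String × Int => a.1 == k' := by
    funext a; by_cases ha : a.1 = k' <;> simp [ha, h]
  rw [this]

theorem getD_erase_of_ne (d : PySem.Dict String Int) (k k' : String) (v : Int) (h : k' ≠ k) :
    (d.erase k).getD k' v = d.getD k' v := by
  simp [PySem.Dict.getD, get?_erase_of_ne d k k' h]

theorem insert_insert_swap (d : PySem.Dict String Int) (k k' : String) (v w : Int)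
    (hne : k' ≠ k) (hc : d.contains k' = true) :
    (d.insert k' w).insert k v = (d.insert k v).insert k' w := by
  apply PySem.Dict.ext
  by_cases hk : d.contains k = true
  · rw [PySem.Dict.items_insert_of_contains _ w (by simp [PySem.Dict.contains_insert, hc]),
        PySem.Dict.items_insert_of_contains _ v hk,
        PySem.Dict.items_insert_of_contains _ v (by simp [PySem.Dict.contains_insert, hk]),
        PySem.Dict.items_insert_of_contains _ w hc,
        List.map_map, List.map_map]
    apply List.map_congr_left
    intro p _
    by_cases h1 : p.1 = k' <;> by_cases h2 : p.1 = k <;> simp_all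
  · rw [PySem.Dict.items_insert_of_not_contains _ v
          (by simp only [PySem.Dict.contains_insert, Bool.or_eq_false_iff]
              exact ⟨by simpa using fun h => hne h.symm, by simpa using hk⟩),
        PySem.Dict.items_insert_of_contains _ w hc,
        PySem.Dict.items_insert_of_contains _ w (by simp [PySem.Dict.contains_insert, hc]),
        PySem.Dict.items_insert_of_not_contains _ v (by simpa using hk),
        List.map_append]
    simp only [List.map_cons, List.map_nil]
    congr 2
    simp
    intro h; exact absurd h.symm hne

theorem foldl_modify_insert_swap (l : List (String × Int)) (O : PySem.Dict String Int)
    (k : String) (v : Int)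
    (hk : ∀ p ∈ l, p.1 ≠ k) (hc : ∀ p ∈ l, O.contains p.1 = true) :
    (l.foldl (fun o p => o.modify p.1 0 (fun w => w + p.2)) O).insert k v
      = l.foldl (fun o p => o.modify p.1 0 (fun w => w + p.2)) (O.insert k v) := by
  induction l generalizing O with
  | nil => rfl
  | cons p rest ih =>
    simp only [List.foldl_cons]
    rw [ih _ (fun q hq => hk q (List.mem_cons_of_mem _ hq))
          (fun q hq => by
            rw [PySem.Dict.contains_modify]
            simp [hc q (List.mem_cons_of_mem _ hq)])]
    congr 1
    simp only [PySem.Dict.modify]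
    rw [insert_insert_swap _ _ _ _ _ (hk p (List.mem_cons_self ..)) (hc p (List.mem_cons_self ..)),
        PySem.Dict.getD_insert_of_ne O v 0 (hk p (List.mem_cons_self ..))]

theorem merge_split_eq (l : List (String × Int)) (O : PySem.Dict String Int)
    (hl : (l.map Prod.fst).Nodup) :
    (l.filter (fun p => !O.contains p.1)).foldl (fun d p => d.insert p.1 p.2)
      ((l.filter (fun p => O.contains p.1)).foldl (fun o p => o.modify p.1 0 (fun w => w + p.2)) O)
    = l.foldl mergeStep O := by
  induction l generalizing O with
  | nil => rfl
  | cons p rest ih =>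
    simp only [List.map_cons, List.nodup_cons, List.mem_map] at hl
    obtain ⟨hp, hrest⟩ := hl
    have hkne : ∀ q ∈ rest, q.1 ≠ p.1 := fun q hq h => hp ⟨q, hq, h⟩
    by_cases hc : O.contains p.1 = true
    · simp only [List.filter_cons, hc, Bool.not_true, List.foldl_cons, mergeStep,
        Bool.false_eq_true, ↓reduceIte]
      rw [List.filter_congr (fun q hq => ?_ : ∀ q ∈ rest,
            (O.contains q.1) = ((O.modify p.1 0 (fun w => w + p.2)).contains q.1)),
          List.filter_congr (fun q hq => ?_ : ∀ q ∈ rest,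
            (!O.contains q.1) = (!(O.modify p.1 0 (fun w => w + p.2)).contains q.1))]
      · exact ih _ hrest
      · rw [PySem.Dict.contains_modify]; simp [hkne q hq]
      · rw [PySem.Dict.contains_modify]; simp [hkne q hq]
    · simp only [List.filter_cons, hc, Bool.not_false, List.foldl_cons, mergeStep,
        Bool.false_eq_true, ↓reduceIte]
      rw [foldl_modify_insert_swap _ _ _ _
            (fun q hq => hkne q (List.mem_of_mem_filter hq))
            (fun q hq => (List.mem_filter.mp hq).2),
          List.filter_congr (fun q hq => ?_ : ∀ q ∈ rest,
            (O.contains q.1) = ((O.insert p.1 p.2).contains q.1)),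
          List.filter_congr (fun q hq => ?_ : ∀ q ∈ rest,
            (!O.contains q.1) = (!(O.insert p.1 p.2).contains q.1))]
      · exact ih _ hrest
      · rw [PySem.Dict.contains_insert]; simp [hkne q hq]
      · rw [PySem.Dict.contains_insert]; simp [hkne q hq]

theorem set_ofList_keys_contains (d : PySem.Dict String Int) (k : String) :
    PySem.Set.contains (PySem.Set.ofList d.keys) k = d.contains k := by
  rw [PySem.Dict.contains_eq_decide_mem_keys, Bool.eq_iff_iff]
  simp [PySem.Set.contains, PySem.Set.mem_ofList]

theorem pair_foldl_split (ks : List String) (O d2 : PySem.Dict String Int) (hnd : ks.Nodup) :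
    ks.foldl (fun (st : PySem.Dict String Int × PySem.Dict String Int) k =>
        (st.1.modify k 0 (fun w => w + st.2.getD k 0), st.2.erase k)) (O, d2)
    = (ks.foldl (fun o k => o.modify k 0 (fun w => w + d2.getD k 0)) O,
       ks.foldl (fun d k => d.erase k) d2) := by
  induction ks generalizing O d2 with
  | nil => rfl
  | cons k rest ih =>
    simp only [List.nodup_cons] at hnd
    simp only [List.foldl_cons]
    rw [ih _ _ hnd.2,
        PySem.List.foldl_congr_mem rest _ (fun o k' => o.modify k' 0 (fun w => w + d2.getD k' 0)) _
          (fun o k' hk' => by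
            rw [getD_erase_of_ne _ _ _ _ (fun h : k' = k => hnd.1 (h ▸ hk'))])]

theorem foldl_erase_items (ks : List String) (d : PySem.Dict String Int) :
    (ks.foldl (fun d k => d.erase k) d).items
      = d.items.filter (fun p => !ks.contains p.1) := by
  induction ks generalizing d with
  | nil => simp
  | cons k rest ih =>
    rw [List.foldl_cons, ih]
    simp only [PySem.Dict.erase, List.filter_filter]
    apply List.filter_congr
    intro p _
    by_cases h : p.1 = k <;> simp [h, Bool.and_comm]

-- A reduces to the single-pass merge fold over dict2's items
theorem A_eq_fold (d1 d2 : List (String × Int)) :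
    dict_sum_value d1 d2
      = ((PySem.Dict.ofList d2).items.foldl mergeStep (PySem.Dict.ofList d1)).items := by
  unfold dict_sum_value
  set O := PySem.Dict.ofList d1 with hO
  set D := PySem.Dict.ofList d2 with hD
  have hDk : D.keys.Nodup := PySem.Dict.nodup_keys_ofList d2
  have hinter : PySem.Set.inter (PySem.Set.ofList D.keys) (PySem.Set.ofList O.keys)
      = (D.items.filter (fun p => O.contains p.1)).map Prod.fst := by
    show (PySem.Set.ofList D.keys).filter (fun k => (PySem.Set.ofList O.keys).contains k)
        = (D.items.filter (fun p => O.contains p.1)).map Prod.fst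
    rw [PySem.Set.ofList_eq_self_of_nodup _ hDk,
        List.filter_congr (fun k _ => set_ofList_keys_contains O k)]
    show (D.items.map Prod.fst).filter (fun k => O.contains k)
        = (D.items.filter (fun p => O.contains p.1)).map Prod.fst
    rw [List.filter_map]
    rfl
  simp only [hinter]
  rw [pair_foldl_split _ _ _ ((List.filter_sublist.map Prod.fst).nodup hDk)]
  have hmem : ∀ p ∈ D.items,
      (((D.items.filter (fun p => O.contains p.1)).map Prod.fst).contains p.1) = O.contains p.1 := by
    intro p hp
    rw [Bool.eq_iff_iff]
    constructor
    · intro h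
      have hm : p.1 ∈ (D.items.filter (fun p => O.contains p.1)).map Prod.fst := by simpa using h
      obtain ⟨q, hq, hq1⟩ := List.mem_map.mp hm
      rw [← hq1]
      exact (List.mem_filter.mp hq).2
    · intro h
      have hf : p ∈ D.items.filter (fun q => O.contains q.1) := List.mem_filter.mpr ⟨hp, h⟩
      simpa using List.mem_map_of_mem (f := Prod.fst) hf
  rw [List.foldl_map]
  rw [PySem.List.foldl_congr_mem (D.items.filter (fun p => O.contains p.1))
        (fun o p => o.modify p.1 0 (fun w => w + D.getD p.1 0))
        (fun o p => o.modify p.1 0 (fun w => w + p.2)) O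
        (fun o p hp => by
          obtain ⟨a, b⟩ := p
          simp only []
          rw [PySem.Dict.getD_of_mem_items D (List.mem_of_mem_filter hp) hDk 0])]
  rw [foldl_erase_items]
  rw [show (List.filter (fun p =>
        !(List.map Prod.fst (List.filter (fun p => O.contains p.1) D.items)).contains p.1) D.items)
      = List.filter (fun p => !O.contains p.1) D.items from
    List.filter_congr (fun p hp => by rw [hmem p hp])]
  show (PySem.Dict.update _ _).items = _
  simp only [PySem.Dict.update]
  rw [merge_split_eq D.items O hDk]

-- the merge fold, written as the comprehension over the merged key order
theorem fold_items (l : List (String × Int)) (O : PySem.Dict String Int)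
    (hl : (l.map Prod.fst).Nodup) (hO : O.keys.Nodup) :
    (l.foldl mergeStep O).items
      = (PySem.Dict.update O l).keys.map
          (fun k => (k, O.getD k 0 + (PySem.Dict.mk l).getD k 0)) := by
  induction l generalizing O with
  | nil =>
    simpa [PySem.Dict.update, PySem.Dict.getD, PySem.Dict.get?] using
      PySem.Dict.items_eq_map_keys O hO 0
  | cons p rest ih =>
    obtain ⟨pk, pv⟩ := p
    simp only [List.map_cons, List.nodup_cons, List.mem_map] at hl
    obtain ⟨hp, hrest⟩ := hl
    have hnotin : pk ∉ rest.map Prod.fst := by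
      intro h
      obtain ⟨q, hq, hq1⟩ := List.mem_map.mp h
      exact hp ⟨q, hq, hq1⟩
    have hkeys : (mergeStep O (pk, pv)).keys = (O.insert pk pv).keys := by
      unfold mergeStep
      split
      · rw [PySem.Dict.keys_modify, PySem.Dict.keys_insert_of_contains _ _ (by assumption),
            PySem.Dict.keys_insert_of_contains _ _ (by assumption)]
      · rfl
    have hOnd : (mergeStep O (pk, pv)).keys.Nodup := by
      rw [hkeys]; exact PySem.Dict.nodup_keys_insert _ _ _ hO
    have hkeysu : (PySem.Dict.update O ((pk, pv) :: rest)).keys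
        = (PySem.Dict.update (mergeStep O (pk, pv)) rest).keys := by
      simp only [PySem.Dict.update, List.foldl_cons]
      rw [PySem.Dict.keys_foldl_insert_key, PySem.Dict.keys_foldl_insert_key, hkeys]
    rw [List.foldl_cons, ih _ hrest hOnd, hkeysu]
    apply List.map_congr_left
    intro k _
    by_cases hk : k = pk
    · subst hk
      have hr0 : (PySem.Dict.mk rest).getD k 0 = 0 := by
        apply PySem.Dict.getD_of_not_contains
        rw [PySem.Dict.contains_mk, List.any_eq_false]
        intro q hq
        have hne : q.1 ≠ k := fun h => hnotin (h ▸ List.mem_map_of_mem (f := Prod.fst) hq)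
        simpa using hne
      have hc1 : (PySem.Dict.mk ((k, pv) :: rest)).getD k 0 = pv := by
        rw [PySem.Dict.getD, PySem.Dict.get?_mk_cons, if_pos (by simp)]
        rfl
      rw [hr0, hc1]
      unfold mergeStep
      split
      · rw [PySem.Dict.getD_modify_self]; simp
      · next h =>
        rw [PySem.Dict.getD_insert_self,
            PySem.Dict.getD_of_not_contains O 0 (by simpa using h)]
        simp
    · have hmk : (PySem.Dict.mk ((pk, pv) :: rest)).getD k 0 = (PySem.Dict.mk rest).getD k 0 := by
        simp only [PySem.Dict.getD, PySem.Dict.get?_mk_cons]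
        simp [show (pk == k) = false by simpa using fun h => hk h.symm]
      rw [hmk]
      unfold mergeStep
      split
      · rw [PySem.Dict.getD_modify_of_ne _ _ _ hk]
      · rw [PySem.Dict.getD_insert_of_ne _ _ _ hk]

theorem main_eq (d1 d2 : List (String × Int)) : dict_sum_value d1 d2 = dict_sum_value_alt d1 d2 := by
  rw [A_eq_fold, fold_items _ _ (PySem.Dict.nodup_keys_ofList d2) (PySem.Dict.nodup_keys_ofList d1)]
  unfold dict_sum_value_alt
  have : PySem.Dict.mk (PySem.Dict.ofList d2).items = PySem.Dict.ofList d2 := by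
    cases PySem.Dict.ofList d2; rfl
  rw [this]

-- ===== VERDICT (by name: the statement is the Claim_ definition above) =====
theorem dict_sum_value_spec : Claim_equal_dict_sum_value := by
  intro d1 d2 _
  unfold Spec_dict_sum_value
  exact main_eq d1 d2
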